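-- pv_equiv track=rewrite | github.com/Minchangi574/algorithm | 프로그래머스/0/181904. 세로 읽기/세로 읽기.py | solution
-- ===== SOURCE A (Python) =====
-- def solution(my_string, m, c):
--     a=[] # 각 행 추가하는 리스트
--     answer=[] # 전체 완성 문자 리스트
--     total=[] # 각 행이 모두 모인 리스트
--     num=1 # 몇 행인지
--     for i in range(len(my_string)):
--         if i%m==0:
--             a.append(my_string[i])
--         else:
--             a.append(my_string[i])
--             if len(a)==m:
--                 total.append(a)
--                 a=[]
--                 num+=1
--     for i in total:
--         answer.append(i[c-1])
--     if answer==[]: # m 1이면 그냥 전부 출력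
--         answer_=my_string
--     else:
--         answer_="".join(answer)
--     return answer_
-- ===== SOURCE B (Python) =====
-- def solution(my_string, m, c):
--     rows = len(my_string) // m
--     if m == 1 or rows <= 0:
--         return my_string
--     return "".join(my_string[r * m:(r + 1) * m][c - 1] for r in range(rows))
-- ===== Notes on version B (the rewrite author's own statement) =====
-- stated objective: simpler
-- what changed: B replaces A's stateful two-pass matrix construction (accumulate characters into a row buffer, flush each full row into a list-of-lists, then re-index every row) by slicing each full row arithmetically and indexing it directly, with A's whole-string fallback when there is no complete row or m == 1.
-- outside the precondition, e.g. on solution('', 0, 5): A returns '', B raises ZeroDivisionError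
import Mathlib
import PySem

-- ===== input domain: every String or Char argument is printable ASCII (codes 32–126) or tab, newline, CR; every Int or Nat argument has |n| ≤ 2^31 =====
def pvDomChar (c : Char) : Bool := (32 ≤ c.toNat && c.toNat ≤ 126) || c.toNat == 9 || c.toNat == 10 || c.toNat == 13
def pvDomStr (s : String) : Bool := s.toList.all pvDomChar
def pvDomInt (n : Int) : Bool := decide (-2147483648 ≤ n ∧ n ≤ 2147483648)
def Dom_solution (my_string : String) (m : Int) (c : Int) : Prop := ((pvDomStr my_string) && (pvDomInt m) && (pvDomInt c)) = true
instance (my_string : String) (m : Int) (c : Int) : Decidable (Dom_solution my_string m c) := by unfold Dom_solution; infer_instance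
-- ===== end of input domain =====

-- B replaces A's stateful row-buffer/matrix construction by arithmetic row slices indexed directly
-- (objective: simpler); equal return values on Pre_.

-- ===== PORT A =====
-- loop body of A's first for-loop (state: (a, total, num))
def solAStep (m : Int) (st : List Char × List (List Char) × Int) (p : Int × Char) :
    List Char × List (List Char) × Int :=
  if PySem.Int.mod p.1 m = 0 then
    (st.1 ++ [p.2], st.2.1, st.2.2)
  else
    let a' := st.1 ++ [p.2]
    if (a'.length : Int) = m then ([], st.2.1 ++ [a'], st.2.2 + 1)
    else (a', st.2.1, st.2.2)

def solution (my_string : String) (m : Int) (c : Int) : String :=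
  let s := my_string.toList
  let st := (PySem.List.enumerate s 0).foldl (solAStep m) (([] : List Char), ([] : List (List Char)), (1 : Int))
  let answer := st.2.1.map (fun row => (PySem.List.pyGet? row (c - 1)).getD ' ')
  if answer = [] then my_string else String.ofList answer

-- ===== PORT B =====
def solution_alt (my_string : String) (m : Int) (c : Int) : String :=
  let s := my_string.toList
  let rows := PySem.Int.floordiv (s.length : Int) m
  if m = 1 ∨ rows ≤ 0 then my_string
  else
    String.ofList ((PySem.List.pyRange 0 rows 1).map (fun r =>
      (PySem.List.pyGet? (PySem.List.slice s (some (r * m)) (some ((r + 1) * m))) (c - 1)).getD ' '))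

-- ===== PRECONDITION & SPEC =====
-- Pre_ excludes m = 0 (A raises ZeroDivisionError for nonempty strings; on the empty string A returns ''
-- but B's division itself raises) and, when m ≥ 2 with at least one full row, column numbers c outside
-- Python's valid row-index range 1-m..m, on which both A and B raise IndexError.
def Pre_solution (my_string : String) (m : Int) (c : Int) : Prop :=
  m ≠ 0 ∧ (m < 2 ∨ (my_string.toList.length : Int) < m ∨ (1 - m ≤ c ∧ c ≤ m))

instance (my_string : String) (m : Int) (c : Int) : Decidable (Pre_solution my_string m c) := by
  unfold Pre_solution; infer_instance

def pvWitness_solution : String × Int × Int := ("abcdef", 2, 1)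

def Spec_solution (my_string : String) (m : Int) (c : Int) (out : String) : Prop := out = solution_alt my_string m c
instance (my_string : String) (m : Int) (c : Int) (out : String) : Decidable (Spec_solution my_string m c out) := by
  unfold Spec_solution; infer_instance

-- ===== CLAIM (what is proved, stated in full; the proofs are below) =====
def Claim_equal_solution : Prop := ∀ (my_string : String) (m : Int) (c : Int), Dom_solution my_string m c → Pre_solution my_string m c → Spec_solution my_string m c (solution my_string m c)

-- ===== LEMMAS AND PROOFS =====

-- the list of full rows: chunks of M characters, partial last chunk dropped
def solGroups (M : Nat) (l : List Char) : List (List Char) :=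
  (List.range (l.length / M)).map (fun j => (l.drop (j * M)).take M)

lemma solGroups_small {M : Nat} {l : List Char} (h : l.length < M) : solGroups M l = [] := by
  unfold solGroups
  rw [Nat.div_eq_of_lt h]
  simp

lemma solGroups_cons {M : Nat} (hM : 0 < M) (p s : List Char) (hp : p.length = M) :
    solGroups M (p ++ s) = p :: solGroups M s := by
  unfold solGroups
  have hlen : (p ++ s).length = s.length + M := by simp [hp]; omega
  rw [hlen, Nat.add_div_right _ hM, List.range_succ_eq_map]
  simp only [List.map_cons, List.map_map]
  congr 1
  · simpa using List.take_left' hp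
  · apply List.map_congr_left
    intro j _
    have h2 : (j + 1) * M = p.length + j * M := by rw [hp]; ring
    simp [Function.comp, h2, List.drop_length_add_append]

-- m = 1: every index takes the first branch, total stays empty
lemma fold_total_one (s : List Char) : ∀ (k : Int) (a : List Char) (T : List (List Char)) (num : Int),
    ((PySem.List.enumerate s k).foldl (solAStep 1) (a, T, num)).2.1 = T := by
  induction s with
  | nil => intro k a T num; simp [PySem.List.enumerate_nil]
  | cons x s ih =>
      intro k a T num
      rw [PySem.List.enumerate_cons]
      have h1 : PySem.Int.mod k 1 = 0 := by
        rw [PySem.Int.mod_eq_emod_of_pos (by omega)]; omega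
      simp only [List.foldl_cons, solAStep, h1]
      exact ih (k + 1) _ T num

-- m < 0: the flush test len(a) == m never fires, total stays empty
lemma fold_total_neg {m : Int} (hm : m < 0) (s : List Char) :
    ∀ (k : Int) (a : List Char) (T : List (List Char)) (num : Int),
    ((PySem.List.enumerate s k).foldl (solAStep m) (a, T, num)).2.1 = T := by
  induction s with
  | nil => intro k a T num; simp [PySem.List.enumerate_nil]
  | cons x s ih =>
      intro k a T num
      rw [PySem.List.enumerate_cons, List.foldl_cons]
      by_cases h0 : PySem.Int.mod k m = 0
      · simp only [solAStep, h0]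
        exact ih (k + 1) _ T num
      · have hne : ((a ++ [x]).length : Int) ≠ m := by
          simp; omega
        simp only [solAStep, if_neg h0, if_neg hne]
        exact ih (k + 1) _ T num

lemma pv_emod_succ {k m : Int} (hm : 0 < m) :
    (k + 1) % m = if k % m + 1 = m then 0 else k % m + 1 := by
  have h : (k + 1) % m = (k % m + 1) % m := by
    conv_lhs => rw [← Int.emod_add_mul_ediv k m]
    rw [show k % m + m * (k / m) + 1 = k % m + 1 + m * (k / m) by ring]
    simp [Int.add_mul_emod_self_left]
  have h1 : 0 ≤ k % m := Int.emod_nonneg _ (by omega)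
  have h2 : k % m < m := Int.emod_lt_of_pos _ hm
  rw [h]
  split_ifs with hcase
  · rw [hcase]; simp
  · exact Int.emod_eq_of_lt (by omega) (by omega)

-- m ≥ 2: total accumulates the full m-chunks of (a ++ s)
lemma fold_total_pos {m : Int} (hm : 2 ≤ m) (s : List Char) :
    ∀ (k : Int) (a : List Char) (T : List (List Char)) (num : Int),
    0 ≤ k → (a.length : Int) = PySem.Int.mod k m →
    ((PySem.List.enumerate s k).foldl (solAStep m) (a, T, num)).2.1 = T ++ solGroups m.toNat (a ++ s) := by
  induction s with
  | nil =>
      intro k a T num hk ha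
      have hlt : (a.length : Int) < m := by
        rw [ha]; exact PySem.Int.mod_lt _ (by omega)
      rw [PySem.List.enumerate_nil]
      simp only [List.foldl_nil, List.append_nil]
      rw [solGroups_small (show a.length < m.toNat by omega)]
      simp
  | cons x s ih =>
      intro k a T num hk ha
      rw [PySem.List.enumerate_cons, List.foldl_cons]
      rw [PySem.Int.mod_eq_emod_of_pos (by omega)] at ha
      have hmod1 : PySem.Int.mod (k + 1) m = (k + 1) % m := PySem.Int.mod_eq_emod_of_pos (by omega)
      have hs := pv_emod_succ (k := k) (m := m) (by omega)
      by_cases h0 : PySem.Int.mod k m = 0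
      · rw [PySem.Int.mod_eq_emod_of_pos (by omega)] at h0
        have ha0 : a = [] := by
          have : a.length = 0 := by omega
          simpa [List.length_eq_zero_iff] using this
        subst ha0
        simp only [solAStep, PySem.Int.mod_eq_emod_of_pos (show (0:Int) < m by omega), h0]
        have := ih (k + 1) [x] T num (by omega) (by rw [hmod1, hs]; split_ifs <;> simp <;> omega)
        simpa using this
      · rw [PySem.Int.mod_eq_emod_of_pos (by omega)] at h0
        have hb : ¬ (PySem.Int.mod k m = 0) := by
          rw [PySem.Int.mod_eq_emod_of_pos (by omega)]; exact h0
        have hmodlt : k % m < m := Int.emod_lt_of_pos _ (by omega)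
        have hmodnn : 0 ≤ k % m := Int.emod_nonneg _ (by omega)
        by_cases hfull : ((a ++ [x]).length : Int) = m
        · simp only [solAStep, if_neg hb, if_pos hfull]
          have hinv : ((0:Nat) : Int) = PySem.Int.mod (k + 1) m := by
            rw [hmod1, hs]; split_ifs <;> simp at hfull ⊢ <;> omega
          have := ih (k + 1) [] (T ++ [a ++ [x]]) (num + 1) (by omega) (by simpa using hinv)
          rw [this]
          have hg : solGroups m.toNat ((a ++ [x]) ++ s) = (a ++ [x]) :: solGroups m.toNat s := by
            apply solGroups_cons (by omega)
            simp at hfull ⊢; omega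
          rw [show a ++ x :: s = (a ++ [x]) ++ s from by simp, hg]
          simp
        · simp only [solAStep, if_neg hb, if_neg hfull]
          have hinv : (((a ++ [x]).length : Nat) : Int) = PySem.Int.mod (k + 1) m := by
            rw [hmod1, hs]; split_ifs <;> simp at hfull ⊢ <;> omega
          have := ih (k + 1) (a ++ [x]) T num (by omega) hinv
          rw [this, show a ++ x :: s = (a ++ [x]) ++ s from by simp]

-- ===== VERDICT (by name: the statement is the Claim_ definition above) =====
lemma fold_total_pos_zero {m : Int} (hm : 2 ≤ m) (s : List Char) :
    ((PySem.List.enumerate s 0).foldl (solAStep m) (([] : List Char), ([] : List (List Char)), (1 : Int))).2.1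
      = solGroups m.toNat s := by
  have h := fold_total_pos hm s 0 [] [] 1 (by omega)
    (by rw [PySem.Int.mod_eq_emod_of_pos (by omega)]; simp)
  simpa using h

theorem solution_spec : Claim_equal_solution := by
  intro my_string m c _hdom hpre
  obtain ⟨hm0, _⟩ := hpre
  unfold Spec_solution solution solution_alt
  dsimp only
  by_cases h1 : m = 1
  · subst h1
    rw [fold_total_one, List.map_nil, if_pos rfl, if_pos (Or.inl rfl)]
  · by_cases hneg : m < 0
    · have hrows : PySem.Int.floordiv (my_string.toList.length : Int) m ≤ 0 := by
        have hfd := PySem.Int.floordiv_mul_add_mod (my_string.toList.length : Int) m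
        have hb := PySem.Int.mod_neg_bounds (a := (my_string.toList.length : Int)) (b := m) hneg
        nlinarith [Int.natCast_nonneg my_string.toList.length]
      rw [fold_total_neg hneg, List.map_nil, if_pos rfl, if_pos (Or.inr hrows)]
    · have hm2 : 2 ≤ m := by omega
      have hM : m = ((m.toNat : Nat) : Int) := (Int.toNat_of_nonneg (by omega)).symm
      have hMpos : 0 < m.toNat := by omega
      set M := m.toNat with hMdef
      set s := my_string.toList with hsdef
      rw [fold_total_pos_zero hm2]
      have hrows : PySem.Int.floordiv (s.length : Int) m = ((s.length / M : Nat) : Int) := by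
        rw [hM]; exact PySem.Int.floordiv_natCast s.length M
      by_cases hsmall : s.length < M
      · have hdiv0 : s.length / M = 0 := Nat.div_eq_of_lt hsmall
        rw [solGroups_small hsmall]
        simp [hrows, hdiv0]
      · have hdivpos : 0 < s.length / M := Nat.div_pos (by omega) hMpos
        have hgne : solGroups M s ≠ [] := by
          unfold solGroups
          simp [List.range_eq_nil]
          omega
        have hcond : ¬ (m = 1 ∨ PySem.Int.floordiv (s.length : Int) m ≤ 0) := by
          rw [hrows]
          rintro (h | h)
          · exact h1 h
          · have : (0 : Int) < ((s.length / M : Nat) : Int) := by exact_mod_cast hdivpos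
            omega
        rw [if_neg (by simpa [List.map_eq_nil_iff] using hgne), if_neg hcond]
        congr 1
        rw [hrows, PySem.List.pyRange_one 0 ((s.length / M : Nat) : Int)]
        unfold solGroups
        simp only [List.map_map, sub_zero, Int.toNat_natCast]
        apply List.map_congr_left
        intro j _
        simp only [Function.comp_apply]
        have e1 : (0 : Int) + (j : Int) = ((j : Nat) : Int) := by omega
        have e2 : ((j : Nat) : Int) * m = (((j * M : Nat) : Nat) : Int) := by rw [hM]; push_cast; ring
        have e3 : (((j : Nat) : Int) + 1) * m = (((j * M + M : Nat) : Nat) : Int) := by rw [hM]; push_cast; ring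
        rw [e1, e2, e3, PySem.List.slice_natCast, show j * M + M - j * M = M from by omega]
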